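-- pv_equiv track=rewrite | github.com/byhhh2/Coding-Test-Preparations | 우테코/5번.py | solution
-- ===== SOURCE A (Python) =====
-- def solution(rows, columns):
--     answer = [[0] * columns for _ in range(rows)]
--
--     answer[0][0] = 1
--     r, c = 0, 0
--     cur = 1
--
--     while True:
--         if rows == columns:
--             if answer[rows-1][0] != 0:
--                 break
--
--         flag = 0
--
--         for a in answer:
--             if 0 in a:
--                 flag = 1
--                 break
--
--         if flag == 0:
--             break
--
--         if cur % 2 == 0:
--             r = (r + 1) % rows
--         else:
--             c = (c + 1) % columns
--
--         cur += 1
--         answer[r][c] = cur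
--
--     return answer
-- ===== SOURCE B (Python) =====
-- def solution(rows, columns):
--     grid = [[0] * columns for _ in range(rows)]
--     grid[0][0] = 1
--     remaining = rows * columns - 1
--     k = 1
--     while remaining > 0 and not (rows == columns and grid[rows - 1][0] != 0):
--         k += 1
--         i = ((k - 1) // 2) % rows
--         j = (k // 2) % columns
--         if grid[i][j] == 0:
--             remaining -= 1
--         grid[i][j] = k
--     return grid
-- ===== Notes on version B (the rewrite author's own statement) =====
-- stated objective: faster
-- what changed: B replaces A's per-iteration full-matrix rescan for zeros and incremental r/c state with a remaining-zeros counter decremented on 0->nonzero writes and closed-form walk positions ((k-1)//2 % rows, k//2 % columns).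
import Mathlib
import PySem

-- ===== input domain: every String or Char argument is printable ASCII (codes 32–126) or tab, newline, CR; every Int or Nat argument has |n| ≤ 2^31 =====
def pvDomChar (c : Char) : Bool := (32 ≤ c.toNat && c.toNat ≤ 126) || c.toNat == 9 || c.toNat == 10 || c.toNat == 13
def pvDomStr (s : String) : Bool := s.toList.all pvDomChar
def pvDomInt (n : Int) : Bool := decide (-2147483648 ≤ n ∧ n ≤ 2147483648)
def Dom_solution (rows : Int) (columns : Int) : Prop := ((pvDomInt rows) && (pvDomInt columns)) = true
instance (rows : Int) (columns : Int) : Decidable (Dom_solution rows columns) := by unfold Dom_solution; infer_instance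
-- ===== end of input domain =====

-- B removes A's O(rows·columns) zero-rescan per iteration (remaining-zeros counter, closed-form
-- walk positions); return values proved equal on Pre_ (A raises or diverges outside Pre_).

-- ===== PORT A =====
-- answer[i][j] read/write: indices are always in range (Python `%` of a positive modulus) under
-- Pre_, so getD/set with .toNat is exact there.
def pvGetCell (g : List (List Int)) (i j : Int) : Int := (g.getD i.toNat []).getD j.toNat 0

def pvSetCell (g : List (List Int)) (i j : Int) (v : Int) : List (List Int) :=
  g.set i.toNat ((g.getD i.toNat []).set j.toNat v)

def pvLoopA (rows columns : Int) : Nat → List (List Int) → Int → Int → Int → List (List Int)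
  | 0, ans, _, _, _ => ans
  | n+1, ans, r, c, cur =>
    if rows = columns ∧ pvGetCell ans (rows - 1) 0 ≠ 0 then ans
    else if ¬ (ans.any fun a => a.contains 0) then ans
    else
      let r' := if PySem.Int.mod cur 2 = 0 then PySem.Int.mod (r + 1) rows else r
      let c' := if PySem.Int.mod cur 2 = 0 then c else PySem.Int.mod (c + 1) columns
      let cur' := cur + 1
      pvLoopA rows columns n (pvSetCell ans r' c' cur') r' c' cur'

-- fuel: the loop always breaks within 2·rows·columns+2 iterations on Pre_ inputs
def solution (rows : Int) (columns : Int) : List (List Int) :=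
  let ans := List.replicate rows.toNat (List.replicate columns.toNat (0 : Int))
  pvLoopA rows columns (2 * rows * columns + 2).toNat (pvSetCell ans 0 0 1) 0 0 1

-- ===== PORT B =====
def pvLoopB (rows columns : Int) : Nat → List (List Int) → Int → Int → List (List Int)
  | 0, g, _, _ => g
  | n+1, g, rem, k =>
    if rem > 0 ∧ ¬ (rows = columns ∧ pvGetCell g (rows - 1) 0 ≠ 0) then
      let k' := k + 1
      let i := PySem.Int.mod (PySem.Int.floordiv (k' - 1) 2) rows
      let j := PySem.Int.mod (PySem.Int.floordiv k' 2) columns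
      let rem' := if pvGetCell g i j = 0 then rem - 1 else rem
      pvLoopB rows columns n (pvSetCell g i j k') rem' k'
    else g

def solution_alt (rows : Int) (columns : Int) : List (List Int) :=
  let g := pvSetCell (List.replicate rows.toNat (List.replicate columns.toNat (0 : Int))) 0 0 1
  pvLoopB rows columns (2 * rows * columns + 2).toNat g (rows * columns - 1) 1

-- ===== PRECONDITION & SPEC =====
-- Pre_ excludes rows ≤ 0 or columns ≤ 0 (A raises IndexError) and rows ≠ columns with
-- gcd(rows, columns) ≥ 3 (A's walk never fills the matrix, so A loops forever).
def Pre_solution (rows : Int) (columns : Int) : Prop :=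
  1 ≤ rows ∧ 1 ≤ columns ∧ (rows = columns ∨ Int.gcd rows columns ≤ 2)
instance (rows : Int) (columns : Int) : Decidable (Pre_solution rows columns) := by
  unfold Pre_solution; infer_instance

def pvWitness_solution : Int × Int := (3, 4)

def Spec_solution (rows : Int) (columns : Int) (out : List (List Int)) : Prop := out = solution_alt rows columns
instance (rows : Int) (columns : Int) (out : List (List Int)) : Decidable (Spec_solution rows columns out) := by unfold Spec_solution; infer_instance

-- ===== CLAIM (what is proved, stated in full; the proofs are below) =====
def Claim_equal_solution : Prop := ∀ (rows : Int) (columns : Int), Dom_solution rows columns → Pre_solution rows columns → Spec_solution rows columns (solution rows columns)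

-- ===== LEMMAS AND PROOFS =====

-- number of zero entries, as an Int (B's `remaining`)
def pvZ (g : List (List Int)) : Int := (g.map fun row => ((row.count 0 : Nat) : Int)).sum

lemma pvZ_nonneg (g : List (List Int)) : 0 ≤ pvZ g := by
  apply List.sum_nonneg
  intro x hx
  obtain ⟨row, -, rfl⟩ := List.mem_map.1 hx
  exact Int.natCast_nonneg _

lemma pvZ_pos_iff (g : List (List Int)) :
    (g.any fun a => a.contains 0) = true ↔ 0 < pvZ g := by
  induction g with
  | nil => simp [pvZ]
  | cons a l ih =>
    have h0 : 0 ≤ pvZ l := pvZ_nonneg l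
    have hc : (a.contains 0 = true) ↔ 0 < ((a.count 0 : Nat) : Int) := by
      simp [List.count_pos_iff]
    have hz : pvZ (a :: l) = ((a.count 0 : Nat) : Int) + pvZ l := by simp [pvZ]
    rw [hz, List.any_cons, Bool.or_eq_true, hc, ih]
    have h1 : (0:Int) ≤ ((a.count 0 : Nat) : Int) := Int.natCast_nonneg _
    omega

lemma emod_add_one (a n : Int) : (a % n + 1) % n = (a + 1) % n := by
  conv_rhs => rw [Int.add_emod]
  rw [Int.add_emod (a % n) 1, Int.emod_emod_of_dvd _ dvd_rfl]

lemma count_set_ne_zero : ∀ (row : List Int) (m : Nat) (v : Int), m < row.length → v ≠ 0 →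
    (((row.set m v).count 0 : Nat) : Int)
      = ((row.count 0 : Nat) : Int) - (if row.getD m 0 = 0 then 1 else 0) := by
  intro row
  induction row with
  | nil => intro m v h _; simp at h
  | cons a l ih =>
    intro m v hm hv
    cases m with
    | zero =>
      have h1 : (v :: l).count 0 = l.count 0 := by
        simp [hv]
      have h2 : (a :: l).count 0 = l.count 0 + if a = 0 then 1 else 0 := by
        by_cases h : a = 0
        · simp [h]
        · simp [h]
      rw [List.set_cons_zero, List.getD_cons_zero, h1, h2]
      split_ifs <;> push_cast <;> omega
    | succ m =>
      have hm' : m < l.length := by simpa using hm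
      simp only [List.set_cons_succ, List.getD_cons_succ, List.count_cons]
      have := ih m v hm' hv
      split_ifs at this ⊢ with h1 h2 <;> push_cast at this ⊢ <;> omega

lemma pvZ_set_row : ∀ (g : List (List Int)) (n : Nat) (row' : List Int), n < g.length →
    pvZ (g.set n row')
      = pvZ g - (((g.getD n []).count 0 : Nat) : Int) + ((row'.count 0 : Nat) : Int) := by
  intro g
  induction g with
  | nil => intro n _ h; simp at h
  | cons a l ih =>
    intro n row' hn
    cases n with
    | zero => simp [pvZ]; ring
    | succ n =>
      have hn' : n < l.length := by simpa using hn
      have hz : ∀ x (m : List (List Int)), pvZ (x :: m) = ((x.count 0 : Nat) : Int) + pvZ m := by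
        intro x m; simp [pvZ]
      simp only [List.set_cons_succ, List.getD_cons_succ, hz, ih n row' hn']
      ring

lemma pvZ_set (g : List (List Int)) (i j v : Int) (hil : i.toNat < g.length)
    (hjl : j.toNat < (g.getD i.toNat []).length) (hv : v ≠ 0) :
    pvZ (pvSetCell g i j v) = if pvGetCell g i j = 0 then pvZ g - 1 else pvZ g := by
  unfold pvSetCell pvGetCell
  rw [pvZ_set_row _ _ _ hil, count_set_ne_zero _ _ _ hjl hv]
  split_ifs <;> ring

lemma loop_eq (rows columns : Int) (hr : 0 < rows) (hc : 0 < columns) :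
    ∀ (n : Nat) (g : List (List Int)) (cur : Int), 1 ≤ cur →
    g.length = rows.toNat → (∀ row ∈ g, row.length = columns.toNat) →
    pvLoopA rows columns n g (((cur - 1) / 2) % rows) ((cur / 2) % columns) cur
      = pvLoopB rows columns n g (pvZ g) cur := by
  intro n
  induction n with
  | zero => intros; simp [pvLoopA, pvLoopB]
  | succ n ih =>
    intro g cur hcur hlen hrows
    simp only [pvLoopA, pvLoopB]
    by_cases hS : rows = columns ∧ pvGetCell g (rows - 1) 0 ≠ 0
    · have hnB : ¬(pvZ g > 0 ∧ ¬(rows = columns ∧ pvGetCell g (rows - 1) 0 ≠ 0)) :=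
        fun hh => hh.2 hS
      rw [if_pos hS, if_neg hnB]
    · rw [if_neg hS]
      by_cases hZ : (g.any fun a => a.contains 0) = true
      · have hB : pvZ g > 0 ∧ ¬(rows = columns ∧ pvGetCell g (rows - 1) 0 ≠ 0) :=
          ⟨(pvZ_pos_iff g).1 hZ, hS⟩
        rw [if_neg (not_not_intro hZ), if_pos hB]
        have h2 := Int.emod_two_eq cur
        have h02 : (0:Int) < 2 := by norm_num
        -- the closed-form positions of B for k' = cur + 1
        have hi : PySem.Int.mod (PySem.Int.floordiv (cur + 1 - 1) 2) rows
            = (cur / 2) % rows := by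
          rw [PySem.Int.floordiv_eq_ediv_of_pos h02, PySem.Int.mod_eq_emod_of_pos hr]
          norm_num
        have hj : PySem.Int.mod (PySem.Int.floordiv (cur + 1) 2) columns
            = ((cur + 1) / 2) % columns := by
          rw [PySem.Int.floordiv_eq_ediv_of_pos h02, PySem.Int.mod_eq_emod_of_pos hc]
        -- A's updated r equals B's i
        have hr' : (if PySem.Int.mod cur 2 = 0
              then PySem.Int.mod ((cur - 1) / 2 % rows + 1) rows else (cur - 1) / 2 % rows)
            = (cur / 2) % rows := by
          rw [PySem.Int.mod_eq_emod_of_pos h02]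
          rcases h2 with h | h
          · rw [if_pos h, PySem.Int.mod_eq_emod_of_pos hr, emod_add_one]
            congr 1; omega
          · rw [if_neg (by omega)]
            congr 1; omega
        -- A's updated c equals B's j
        have hc' : (if PySem.Int.mod cur 2 = 0
              then cur / 2 % columns else PySem.Int.mod (cur / 2 % columns + 1) columns)
            = ((cur + 1) / 2) % columns := by
          rw [PySem.Int.mod_eq_emod_of_pos h02]
          rcases h2 with h | h
          · rw [if_pos h]; congr 1; omega
          · rw [if_neg (by omega), PySem.Int.mod_eq_emod_of_pos hc, emod_add_one]
            congr 1; omega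
        rw [hi, hj, hr', hc']
        -- in-range facts for the written cell
        have hI0 : 0 ≤ cur / 2 % rows := Int.emod_nonneg _ (by omega)
        have hIlt : cur / 2 % rows < rows := Int.emod_lt_of_pos _ hr
        have hJ0 : 0 ≤ (cur + 1) / 2 % columns := Int.emod_nonneg _ (by omega)
        have hJlt : (cur + 1) / 2 % columns < columns := Int.emod_lt_of_pos _ hc
        have hInat : (cur / 2 % rows).toNat < g.length := by rw [hlen]; omega
        have hrowmem : g.getD (cur / 2 % rows).toNat [] ∈ g := by
          rw [List.getD_eq_getElem _ _ hInat]
          exact List.getElem_mem _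
        have hJnat : ((cur + 1) / 2 % columns).toNat
            < (g.getD (cur / 2 % rows).toNat []).length := by
          rw [hrows _ hrowmem]; omega
        have hv : cur + 1 ≠ 0 := by omega
        have hrem : (if pvGetCell g (cur / 2 % rows) ((cur + 1) / 2 % columns) = 0
              then pvZ g - 1 else pvZ g)
            = pvZ (pvSetCell g (cur / 2 % rows) ((cur + 1) / 2 % columns) (cur + 1)) := by
          rw [pvZ_set g _ _ _ hInat hJnat hv]
        rw [hrem]
        have hlen' : (pvSetCell g (cur / 2 % rows) ((cur + 1) / 2 % columns) (cur + 1)).length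
            = rows.toNat := by
          unfold pvSetCell; rw [List.length_set]; exact hlen
        have hrows' : ∀ row ∈ pvSetCell g (cur / 2 % rows) ((cur + 1) / 2 % columns) (cur + 1),
            row.length = columns.toNat := by
          intro row hmem
          rcases List.mem_or_eq_of_mem_set hmem with h | h
          · exact hrows _ h
          · rw [h, List.length_set]; exact hrows _ hrowmem
        have := ih (pvSetCell g (cur / 2 % rows) ((cur + 1) / 2 % columns) (cur + 1))
          (cur + 1) (by omega) hlen' hrows'
        simpa using this
      · have hnB : ¬(pvZ g > 0 ∧ ¬(rows = columns ∧ pvGetCell g (rows - 1) 0 ≠ 0)) :=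
          fun hh => hZ ((pvZ_pos_iff g).2 hh.1)
        rw [if_pos hZ, if_neg hnB]

lemma pvZ_init (R C : Nat) :
    pvZ (pvSetCell (List.replicate (R + 1) (List.replicate (C + 1) (0 : Int))) 0 0 1)
      = (R + 1) * (C + 1) - 1 := by
  unfold pvSetCell
  simp only [Int.toNat_zero, List.replicate_succ, List.getD_cons_zero, List.set_cons_zero]
  have hrow : (((1 : Int) :: List.replicate C 0).count 0 : Nat) = C := by
    simp
  have hrep : ∀ n : Nat, pvZ (List.replicate n ((0 : Int) :: List.replicate C (0 : Int)))
      = n * (C + 1) := by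
    intro n
    induction n with
    | zero => simp [pvZ]
    | succ n ihn =>
      have hz : ∀ x (m : List (List Int)), pvZ (x :: m) = ((x.count 0 : Nat) : Int) + pvZ m := by
        intro x m; simp [pvZ]
      rw [List.replicate_succ, hz, ihn]
      simp
      ring
  have hz : ∀ x (m : List (List Int)), pvZ (x :: m) = ((x.count 0 : Nat) : Int) + pvZ m := by
    intro x m; simp [pvZ]
  rw [hz, hrow, hrep]
  ring

-- ===== VERDICT (by name: the statement is the Claim_ definition above) =====
theorem solution_spec : Claim_equal_solution := by
  intro rows columns _ hpre
  obtain ⟨hr, hc, -⟩ := hpre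
  unfold Spec_solution solution solution_alt
  obtain ⟨R, hR⟩ : ∃ R, rows.toNat = R + 1 := ⟨rows.toNat - 1, by omega⟩
  obtain ⟨C, hC⟩ : ∃ C, columns.toNat = C + 1 := ⟨columns.toNat - 1, by omega⟩
  have hlen : (pvSetCell (List.replicate rows.toNat (List.replicate columns.toNat (0 : Int)))
      0 0 1).length = rows.toNat := by
    unfold pvSetCell; rw [List.length_set, List.length_replicate]
  have hrows : ∀ row ∈ pvSetCell (List.replicate rows.toNat (List.replicate columns.toNat
      (0 : Int))) 0 0 1, row.length = columns.toNat := by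
    intro row hmem
    rcases List.mem_or_eq_of_mem_set hmem with h | h
    · exact (List.eq_of_mem_replicate h) ▸ List.length_replicate
    · rw [h, List.length_set]
      simp [hR, List.replicate_succ]
  have key := loop_eq rows columns (by omega) (by omega)
    (2 * rows * columns + 2).toNat
    (pvSetCell (List.replicate rows.toNat (List.replicate columns.toNat (0 : Int))) 0 0 1)
    1 (by norm_num) hlen hrows
  have hZ0 : pvZ (pvSetCell (List.replicate rows.toNat (List.replicate columns.toNat
      (0 : Int))) 0 0 1) = rows * columns - 1 := by
    rw [hR, hC, pvZ_init]
    have h1 : ((R : Int) + 1) = rows := by omega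
    have h2 : ((C : Int) + 1) = columns := by omega
    rw [h1, h2]
  rw [hZ0] at key
  have h10 : ((1 : Int) - 1) / 2 % rows = 0 := by norm_num
  have h11 : (1 : Int) / 2 % columns = 0 := by norm_num
  rw [h10, h11] at key
  exact key
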